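-- pv_equiv track=rewrite | github.com/thepowerfuldeez/cs336_solutions | assignment1-basics/cs336_basics/tokenizer.py | merge_key
-- ===== SOURCE A (Python) =====
-- def merge_key(left: int | bytes, right: int | bytes, k: tuple, new_id: int) -> tuple[tuple[bytes], bool]:
--     """
--     Merges a pair of int | bytes into a key and returns a new key
--     Example: a1, a2 = (111, 257)
--              k = (100, 111, 257)
--              new_id = 258 -> (100, 258)
--
--     Returns: tuple with updated bytes
--     """
--     new_k = list(k)
--     i = 0
--     updated: bool = False
--     while i < len(new_k) - 1:
--         if new_k[i] == left and new_k[i + 1] == right: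
--             new_k[i] = new_id
--             new_k = new_k[: i + 1] + new_k[i + 2 :]
--             updated = True
--         i += 1
--     return tuple(new_k), updated
-- ===== SOURCE B (Python) =====
-- def merge_key(left, right, k, new_id):
--     # Single forward pass: on a (left, right) match emit new_id and skip both
--     # elements; otherwise emit the current element. No in-place mutation or
--     # re-slicing of the working list.
--     out = []
--     updated = False
--     i = 0
--     n = len(k)
--     while i < n:
--         if i + 1 < n and k[i] == left and k[i + 1] == right:
--             out.append(new_id)
--             updated = True
--             i += 2
--         else:
--             out.append(k[i])
--             i += 1
--     return tuple(out), updated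
-- ===== Notes on version B (the rewrite author's own statement) =====
-- stated objective: alternative
-- what changed: Replaced the in-place while loop that re-slices and reconcatenates the list on every match with a single forward pass that appends to a fresh output list and skips two positions on a match.
import Mathlib
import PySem

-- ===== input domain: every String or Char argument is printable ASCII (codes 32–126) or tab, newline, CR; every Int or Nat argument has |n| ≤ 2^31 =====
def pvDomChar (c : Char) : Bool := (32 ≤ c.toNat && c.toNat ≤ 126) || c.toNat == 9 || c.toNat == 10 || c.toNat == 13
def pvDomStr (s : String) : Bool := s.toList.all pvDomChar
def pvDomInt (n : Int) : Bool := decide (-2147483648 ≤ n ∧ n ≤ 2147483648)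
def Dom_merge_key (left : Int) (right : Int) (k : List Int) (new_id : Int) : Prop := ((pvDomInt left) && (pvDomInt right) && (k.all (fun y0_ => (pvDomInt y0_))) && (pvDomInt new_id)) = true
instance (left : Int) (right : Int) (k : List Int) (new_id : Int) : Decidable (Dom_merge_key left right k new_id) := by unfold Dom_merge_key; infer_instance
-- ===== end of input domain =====

-- B replaces A's in-place slice-and-reconcatenate while loop by one forward pass that
-- emits new_id and skips two elements on each (left, right) match.

-- ===== PORT A =====
-- A's while loop: index i over the current (shrinking) list; on a match set slot i to
-- new_id and splice out slot i+1 via slices; i advances every iteration.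
-- getD is exact here: the guard guarantees i and i+1 are in range; take/drop are the
-- nonnegative in-range slices new_k[:i+1] and new_k[i+2:].
def mergeKeyLoopA (left right new_id : Int) : Nat → List Int → Nat → Bool → List Int × Bool
  | 0, new_k, _, updated => (new_k, updated)   -- fuel guard only (fuel = initial length bounds the iterations); never reached from merge_key
  | fuel + 1, new_k, i, updated =>
    if i + 1 < new_k.length then
      if new_k.getD i 0 = left ∧ new_k.getD (i + 1) 0 = right then
        mergeKeyLoopA left right new_id fuel
          (((new_k.set i new_id).take (i + 1)) ++ ((new_k.set i new_id).drop (i + 2)))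
          (i + 1) true
      else
        mergeKeyLoopA left right new_id fuel new_k (i + 1) updated
    else
      (new_k, updated)

def merge_key (left : Int) (right : Int) (k : List Int) (new_id : Int) : List Int × Bool :=
  mergeKeyLoopA left right new_id k.length k 0 false

-- ===== PORT B =====
-- B's single forward pass as the obvious structural recursion over the remaining input:
-- on a match emit new_id (updated := true) and drop both elements, else emit the head.
def mergeKeyPassB (left right new_id : Int) : List Int → List Int × Bool
  | x :: y :: rest =>
      if x = left ∧ y = right then
        (new_id :: (mergeKeyPassB left right new_id rest).1, true)
      else
        let p := mergeKeyPassB left right new_id (y :: rest)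
        (x :: p.1, p.2)
  | xs => (xs, false)

def merge_key_alt (left : Int) (right : Int) (k : List Int) (new_id : Int) : List Int × Bool :=
  mergeKeyPassB left right new_id k

-- ===== PRECONDITION & SPEC =====
def Spec_merge_key (left : Int) (right : Int) (k : List Int) (new_id : Int) (out : List Int × Bool) : Prop := out = merge_key_alt left right k new_id
instance (left : Int) (right : Int) (k : List Int) (new_id : Int) (out : List Int × Bool) : Decidable (Spec_merge_key left right k new_id out) := by unfold Spec_merge_key; infer_instance

-- ===== CLAIM (what is proved, stated in full; the proofs are below) =====
def Claim_equal_merge_key : Prop := ∀ (left : Int) (right : Int) (k : List Int) (new_id : Int), Dom_merge_key left right k new_id → Spec_merge_key left right k new_id (merge_key left right k new_id)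

-- ===== LEMMAS AND PROOFS =====

-- Invariant: with the processed prefix `pre` untouched in front, A's loop at index
-- pre.length computes B's pass over the unprocessed suffix.
theorem mergeKeyLoopA_invariant (left right new_id : Int) :
    ∀ m (xs pre : List Int) (u : Bool), xs.length ≤ m →
      mergeKeyLoopA left right new_id m (pre ++ xs) pre.length u
        = (pre ++ (mergeKeyPassB left right new_id xs).1,
           u || (mergeKeyPassB left right new_id xs).2) := by
  intro m
  induction m with
  | zero =>
    intro xs pre u hm
    have hx : xs = [] := List.eq_nil_of_length_eq_zero (Nat.le_zero.mp hm)
    subst hx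
    simp [mergeKeyLoopA, mergeKeyPassB]
  | succ m ih =>
    intro xs pre u hm
    match xs with
    | [] =>
      simp [mergeKeyLoopA, mergeKeyPassB]
    | [x] =>
      simp [mergeKeyLoopA, mergeKeyPassB]
    | x :: y :: rest =>
      show (if pre.length + 1 < (pre ++ x :: y :: rest).length then _ else _) = _
      have hlen : pre.length + 1 < (pre ++ x :: y :: rest).length := by
        simp
      rw [if_pos hlen]
      have hgx : (pre ++ x :: y :: rest).getD pre.length 0 = x := by
        simp [List.getD_eq_getElem?_getD]
      have hgy : (pre ++ x :: y :: rest).getD (pre.length + 1) 0 = y := by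
        simp [List.getD_eq_getElem?_getD]
      rw [hgx, hgy]
      by_cases hmatch : x = left ∧ y = right
      · rw [if_pos hmatch]
        have hset : (pre ++ x :: y :: rest).set pre.length new_id
            = pre ++ new_id :: y :: rest := by
          rw [List.set_append]; simp
        have hsplice :
            ((pre ++ x :: y :: rest).set pre.length new_id).take (pre.length + 1)
              ++ ((pre ++ x :: y :: rest).set pre.length new_id).drop (pre.length + 2)
            = (pre ++ [new_id]) ++ rest := by
          rw [hset]
          have ht : (pre ++ new_id :: y :: rest).take (pre.length + 1)
              = pre ++ [new_id] := by
            rw [List.take_append]; simp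
          have hd : (pre ++ new_id :: y :: rest).drop (pre.length + 2)
              = rest := by
            rw [List.drop_append]; simp
          rw [ht, hd]
        rw [hsplice]
        have hp1 : pre.length + 1 = (pre ++ [new_id]).length := by simp
        rw [hp1, ih rest (pre ++ [new_id]) true (by simp at hm; omega)]
        simp [mergeKeyPassB, hmatch]
      · rw [if_neg hmatch]
        have hp1 : pre.length + 1 = (pre ++ [x]).length := by simp
        have hassoc : pre ++ x :: y :: rest = (pre ++ [x]) ++ (y :: rest) := by simp
        rw [hassoc, hp1, ih (y :: rest) (pre ++ [x]) u (by simp at hm ⊢; omega)]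
        simp [mergeKeyPassB, hmatch]

-- ===== VERDICT (by name: the statement is the Claim_ definition above) =====
theorem merge_key_spec : Claim_equal_merge_key := by
  intro left right k new_id _
  show merge_key left right k new_id = merge_key_alt left right k new_id
  have h := mergeKeyLoopA_invariant left right new_id k.length k [] false (Nat.le_refl _)
  simpa [merge_key, merge_key_alt] using h
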